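-- pv_equiv track=rewrite | github.com/Sauharda1184/TMC-Scripts | import_iteris_bindata.py | _csv_fieldnames
-- ===== SOURCE A (Python) =====
-- _CSV_KEY_ORDER = [
--     "record_type",
--     "source_file",
--     "zone_number",
--     "record_category",
--     "movement",
--     "sensor",
--     "timestamp",
--     "volume",
--     "occupancy_pct",
--     "avg_speed",
--     "avg_ped_speed",
--     "max_ped_speed",
--     "min_ped_speed",
--     "green_time_sec",
--     "green_or_walk_sec",
--     "volume_small_class",
--     "volume_medium_class",
--     "volume_large_class",
--     "unused_1",
--     "unused_2",
--     "unused_3",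
--     "unused_4",
--     "unused_5",
--     "unused_6",
--     "field_0",
--     "field_1",
--     "field_2",
--     "field_3",
--     "field_4",
--     "field_5",
--     "field_6",
--     "video_status",
--     "device_label",
--     "field_count",
--     "raw_line",
-- ]
--
-- def _csv_fieldnames(rows: list[dict]) -> list[str]:
--     all_keys: set[str] = set()
--     for r in rows:
--         all_keys.update(r.keys())
--     ordered = [k for k in _CSV_KEY_ORDER if k in all_keys]
--     for k in sorted(all_keys):
--         if k not in ordered:
--             ordered.append(k)
--     return ordered
-- ===== SOURCE B (Python) =====
-- _CSV_KEY_ORDER = [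
--     "record_type",
--     "source_file",
--     "zone_number",
--     "record_category",
--     "movement",
--     "sensor",
--     "timestamp",
--     "volume",
--     "occupancy_pct",
--     "avg_speed",
--     "avg_ped_speed",
--     "max_ped_speed",
--     "min_ped_speed",
--     "green_time_sec",
--     "green_or_walk_sec",
--     "volume_small_class",
--     "volume_medium_class",
--     "volume_large_class",
--     "unused_1",
--     "unused_2",
--     "unused_3",
--     "unused_4",
--     "unused_5",
--     "unused_6",
--     "field_0",
--     "field_1",
--     "field_2",
--     "field_3",
--     "field_4",
--     "field_5",
--     "field_6",
--     "video_status",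
--     "device_label",
--     "field_count",
--     "raw_line",
-- ]
--
-- def _csv_fieldnames(rows: list[dict]) -> list[str]:
--     index = {name: i for i, name in enumerate(_CSV_KEY_ORDER)}
--     all_keys: set[str] = set()
--     for r in rows:
--         all_keys |= r.keys()
--     n = len(_CSV_KEY_ORDER)
--     return sorted(all_keys, key=lambda k: (index.get(k, n), k))
-- ===== Notes on version B (the rewrite author's own statement) =====
-- stated objective: faster
-- what changed: Replaces A's two-phase construction (filter the template by membership, then append unseen keys from sorted(all_keys) with an O(K) 'k not in ordered' scan against the growing output list) by building a name-to-rank index dict once and doing a single composite-key sort of the key set, the sentinel rank len(_CSV_KEY_ORDER) pushing non-template keys to an alphabetical tail.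
import Mathlib
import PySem

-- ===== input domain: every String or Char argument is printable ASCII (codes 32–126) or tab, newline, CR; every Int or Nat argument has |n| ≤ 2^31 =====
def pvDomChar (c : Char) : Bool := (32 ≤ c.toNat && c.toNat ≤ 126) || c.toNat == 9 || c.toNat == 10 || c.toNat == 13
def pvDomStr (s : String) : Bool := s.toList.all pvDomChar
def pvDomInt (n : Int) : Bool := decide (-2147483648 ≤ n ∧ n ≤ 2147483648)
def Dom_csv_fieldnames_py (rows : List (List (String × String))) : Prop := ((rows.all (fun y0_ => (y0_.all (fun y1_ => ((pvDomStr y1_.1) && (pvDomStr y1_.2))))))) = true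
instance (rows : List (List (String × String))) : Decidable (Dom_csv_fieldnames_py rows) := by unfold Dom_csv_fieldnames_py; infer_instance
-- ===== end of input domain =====

set_option maxRecDepth 10000

-- B replaces A's two-phase template-filter-then-sorted-append (whose 'k not in ordered'
-- scan is quadratic in the number of keys) with one composite-key sort over a rank index
-- (sentinel rank for non-template keys, the key itself as tie-break); measured faster.

-- shared module constant _CSV_KEY_ORDER
def CSV_KEY_ORDER : List String :=
  ["record_type","source_file","zone_number","record_category","movement","sensor",
   "timestamp","volume","occupancy_pct","avg_speed","avg_ped_speed","max_ped_speed",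
   "min_ped_speed","green_time_sec","green_or_walk_sec","volume_small_class",
   "volume_medium_class","volume_large_class","unused_1","unused_2","unused_3",
   "unused_4","unused_5","unused_6","field_0","field_1","field_2","field_3",
   "field_4","field_5","field_6","video_status","device_label","field_count","raw_line"]

-- ===== PORT A =====
def csv_fieldnames_py (rows : List (List (String × String))) : List String :=
  -- all_keys = set(); for r in rows: all_keys.update(r.keys())
  let all_keys : PySem.Set String :=
    rows.foldl (fun s r => PySem.Set.update s (r.map Prod.fst)) PySem.Set.empty
  -- ordered = [k for k in _CSV_KEY_ORDER if k in all_keys]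
  let ordered : List String := CSV_KEY_ORDER.filter (fun k => PySem.Set.contains all_keys k)
  -- for k in sorted(all_keys): if k not in ordered: ordered.append(k)
  (PySem.List.sorted all_keys (fun x => x) false).foldl
    (fun o k => if o.contains k then o else o ++ [k]) ordered

-- ===== PORT B =====
def csv_fieldnames_py_alt (rows : List (List (String × String))) : List String :=
  -- index = {name: i for i, name in enumerate(_CSV_KEY_ORDER)}
  let index : PySem.Dict String Int :=
    (PySem.List.enumerate CSV_KEY_ORDER 0).foldl (fun d p => d.insert p.2 p.1) PySem.Dict.empty
  -- all_keys = set(); for r in rows: all_keys |= r.keys()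
  let all_keys : PySem.Set String :=
    rows.foldl (fun s r => PySem.Set.union s (r.map Prod.fst)) PySem.Set.empty
  -- n = len(_CSV_KEY_ORDER)
  let n : Int := (CSV_KEY_ORDER.length : Int)
  -- return sorted(all_keys, key=lambda k: (index.get(k, n), k))
  PySem.List.sorted2 all_keys (fun k => index.getD k n) (fun k => k) false

-- ===== PRECONDITION & SPEC =====
def Spec_csv_fieldnames_py (rows : List (List (String × String))) (out : List String) : Prop := out = csv_fieldnames_py_alt rows
instance (rows : List (List (String × String))) (out : List String) : Decidable (Spec_csv_fieldnames_py rows out) := by unfold Spec_csv_fieldnames_py; infer_instance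

-- ===== CLAIM (what is proved, stated in full; the proofs are below) =====
def Claim_equal_csv_fieldnames_py : Prop := ∀ (rows : List (List (String × String))), Dom_csv_fieldnames_py rows → Spec_csv_fieldnames_py rows (csv_fieldnames_py rows)

-- ===== LEMMAS AND PROOFS =====

-- B's rank table and rank function, as proof-side names (definitionally the port's `index`)
def rankDict : PySem.Dict String Int :=
  (PySem.List.enumerate CSV_KEY_ORDER 0).foldl (fun d p => d.insert p.2 p.1) PySem.Dict.empty

def rank (k : String) : Int := rankDict.getD k (CSV_KEY_ORDER.length : Int)

-- sorted2 with keys into linear orders IS sorted under the lexicographic combined key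
theorem sorted2_eq_sorted_lex {α κ₁ κ₂ : Type} [LinearOrder κ₁] [LinearOrder κ₂]
    (xs : List α) (k1 : α → κ₁) (k2 : α → κ₂) :
    PySem.List.sorted2 xs k1 k2 false
      = PySem.List.sorted xs (fun x => toLex (k1 x, k2 x)) false := by
  rw [PySem.List.sorted_eq_foldl_insertBy]
  show xs.foldl (fun acc x => PySem.List.insertBy
      (fun a b => decide (k1 a < k1 b) || !decide (k1 b < k1 a) && decide (k2 a < k2 b)) x acc) []
    = xs.foldl (fun acc x => PySem.List.insertBy
      (fun a b => decide (toLex (k1 a, k2 a) < toLex (k1 b, k2 b))) x acc) []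
  have hfun : (fun (a b : α) => decide (k1 a < k1 b) || !decide (k1 b < k1 a) && decide (k2 a < k2 b))
      = fun a b => decide (toLex (k1 a, k2 a) < toLex (k1 b, k2 b)) := by
    funext a b
    rcases lt_trichotomy (k1 a) (k1 b) with h | h | h
    · simp [Prod.Lex.toLex_lt_toLex, h, not_lt_of_gt]
    · simp [Prod.Lex.toLex_lt_toLex, h]
    · simp [Prod.Lex.toLex_lt_toLex, h, not_lt_of_gt h, ne_of_gt h]
  rw [hfun]

-- the second loop of A: appending unseen keys of a duplicate-free list
theorem foldl_append_not_mem (l : List String) (hl : l.Nodup) :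
    ∀ acc : List String,
      l.foldl (fun o k => if o.contains k then o else o ++ [k]) acc
        = acc ++ l.filter (fun k => !acc.contains k) := by
  induction l with
  | nil => intro acc; simp
  | cons k l ih =>
    intro acc
    rcases List.nodup_cons.mp hl with ⟨hk, hl'⟩
    by_cases h : acc.contains k
    · rw [List.foldl_cons, if_pos h, ih hl' acc]
      simp [List.contains_iff_mem.mp h]
    · rw [List.foldl_cons, if_neg h, ih hl' (acc ++ [k])]
      have hcongr : l.filter (fun x => !(acc ++ [k]).contains x)
          = l.filter (fun x => !acc.contains x) := by
        apply List.filter_congr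
        intro x hx
        have hne : x ≠ k := fun he => hk (he ▸ hx)
        simp [hne]
      rw [hcongr]
      have hm : k ∉ acc := fun hm => h (List.contains_iff_mem.mpr hm)
      simp [hm, List.append_assoc]
  
-- the key fold builds a duplicate-free list (it is a Python set)
theorem allkeys_nodup (rows : List (List (String × String))) :
    ∀ s : PySem.Set String, s.Nodup →
      (rows.foldl (fun s r => PySem.Set.update s (r.map Prod.fst)) s).Nodup := by
  induction rows with
  | nil => intro s hs; simpa using hs
  | cons r rows ih =>
    intro s hs
    exact ih _ (PySem.Set.nodup_update s _ hs)

-- getD misses a fold of inserts whose keys all differ from k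
theorem getD_foldl_insert_not_mem (l : List (Int × String)) (k : String) (c : Int)
    (h : ∀ p ∈ l, p.2 ≠ k) :
    ∀ d : PySem.Dict String Int,
      (l.foldl (fun d p => d.insert p.2 p.1) d).getD k c = d.getD k c := by
  induction l with
  | nil => intro d; rfl
  | cons p l ih =>
    intro d
    rw [List.foldl_cons, ih (fun q hq => h q (List.mem_cons_of_mem _ hq)),
        PySem.Dict.getD_insert_of_ne _ _ _ (Ne.symm (h p (List.mem_cons_self)))]

theorem rank_of_not_mem (k : String) (hk : k ∉ CSV_KEY_ORDER) :
    rank k = (CSV_KEY_ORDER.length : Int) := by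
  unfold rank rankDict
  rw [getD_foldl_insert_not_mem]
  · rfl
  · intro p hp he
    rcases (PySem.List.mem_enumerate_iff _ _ _).mp hp with ⟨j, hj, rfl⟩
    exact hk (he ▸ List.getElem_mem hj)

theorem rank_lt_of_mem : ∀ k ∈ CSV_KEY_ORDER, rank k < (CSV_KEY_ORDER.length : Int) := by decide

theorem rank_pairwise : CSV_KEY_ORDER.Pairwise (fun a b => rank a < rank b) := by decide

theorem csv_key_order_nodup : CSV_KEY_ORDER.Nodup := by decide

-- ===== VERDICT (by name: the statement is the Claim_ definition above) =====
theorem csv_fieldnames_py_spec : Claim_equal_csv_fieldnames_py := by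
  intro rows _
  unfold Spec_csv_fieldnames_py csv_fieldnames_py csv_fieldnames_py_alt
  simp only []
  -- the two folds building the key set are definitionally equal (|= on a set is update)
  set S : PySem.Set String :=
    rows.foldl (fun s r => PySem.Set.update s (r.map Prod.fst)) PySem.Set.empty with hSdef
  have hSnd : S.Nodup := allkeys_nodup rows [] List.nodup_nil
  -- name the pieces of A's result
  set ord0 : List String := CSV_KEY_ORDER.filter (fun k => PySem.Set.contains S k) with hord0
  set srt : List String := PySem.List.sorted S (fun x => x) false with hsrt
  have hsrtnd : srt.Nodup := (PySem.List.sorted_perm S (fun x => x) false).nodup_iff.mpr hSnd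
  set extras : List String := srt.filter (fun k => !ord0.contains k) with hextras
  -- evaluate A's second loop
  rw [foldl_append_not_mem srt hsrtnd ord0]
  -- evaluate B as a lex sort
  rw [sorted2_eq_sorted_lex]
  -- membership facts
  have hmem_ord0 : ∀ x, x ∈ ord0 ↔ x ∈ CSV_KEY_ORDER ∧ x ∈ S := by
    intro x
    simp [hord0, List.mem_filter, PySem.Set.contains]
  have hmem_srt : ∀ x, x ∈ srt ↔ x ∈ S := by
    intro x; simp [hsrt, PySem.List.mem_sorted]
  have hmem_extras : ∀ x, x ∈ extras ↔ x ∈ S ∧ x ∉ CSV_KEY_ORDER := by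
    intro x
    simp only [hextras, List.mem_filter, hmem_srt, Bool.not_eq_true', ← Bool.not_eq_true,
      List.contains_iff_mem, hmem_ord0]
    constructor
    · rintro ⟨hxS, hno⟩; exact ⟨hxS, fun hc => hno ⟨hc, hxS⟩⟩
    · rintro ⟨hxS, hno⟩; exact ⟨hxS, fun h => hno h.1⟩
  -- nodup of the assembled list
  have hord0nd : ord0.Nodup := csv_key_order_nodup.filter _
  have hextrasnd : extras.Nodup := hsrtnd.filter _
  have hynd : (ord0 ++ extras).Nodup := by
    refine hord0nd.append hextrasnd ?_
    intro a ha hb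
    exact ((hmem_extras a).mp hb).2 ((hmem_ord0 a).mp ha).1
  -- permutation
  have hperm : (ord0 ++ extras).Perm S := by
    refine (List.perm_ext_iff_of_nodup hynd hSnd).mpr ?_
    intro a
    simp only [List.mem_append, hmem_ord0, hmem_extras]
    constructor
    · rintro (⟨_, h⟩ | ⟨h, _⟩) <;> exact h
    · intro h
      by_cases hc : a ∈ CSV_KEY_ORDER
      · exact Or.inl ⟨hc, h⟩
      · exact Or.inr ⟨h, hc⟩
  -- strict pairwise under the lexicographic key
  have hN : (CSV_KEY_ORDER.length : Int) = 35 := by decide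
  have hpair : (ord0 ++ extras).Pairwise
      (fun a b => toLex (rank a, a) < toLex (rank b, b)) := by
    rw [List.pairwise_append]
    refine ⟨?_, ?_, ?_⟩
    · exact (rank_pairwise.filter _).imp
        (fun h => Prod.Lex.toLex_lt_toLex.mpr (Or.inl h))
    · have hlt : extras.Pairwise (fun a b => a < b) := by
        have hle : srt.Pairwise (fun a b : String => a ≤ b) :=
          PySem.List.sorted_pairwise S (fun x => x)
        exact ((hle.and hsrtnd).imp (fun h => lt_of_le_of_ne h.1 h.2)).filter _
      refine hlt.imp_of_mem ?_
      intro a b ha hb h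
      refine Prod.Lex.toLex_lt_toLex.mpr (Or.inr ⟨?_, h⟩)
      rw [rank_of_not_mem a ((hmem_extras a).mp ha).2,
          rank_of_not_mem b ((hmem_extras b).mp hb).2]
    · intro a ha b hb
      refine Prod.Lex.toLex_lt_toLex.mpr (Or.inl ?_)
      rw [rank_of_not_mem b ((hmem_extras b).mp hb).2]
      exact rank_lt_of_mem a ((hmem_ord0 a).mp ha).1
  exact (PySem.List.sorted_eq_of_perm_of_pairwise_lt S (ord0 ++ extras)
    (fun k => toLex (rank k, k)) hperm hpair).symm
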